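-- pv_equiv track=rewrite | github.com/prakHr/ProjectEuler-V-2.0 | memoizationAndCache.py | has_divider
-- ===== SOURCE A (Python) =====
-- def has_divider(d):
--     remaining_hash=set()
--     T=(1,1,1)
--     while 1:
--         T=(T[1],T[2],(T[0]+T[1]+T[2])%d)
--         if T[2]==0:
--             return True
--         #h(x,y,z)=d^2*x+d*y+*z
--         value=T[0]*d*d+T[1]*d+T[2]
--         if value in remaining_hash:
--             return False
--         else:
--             remaining_hash.add(value)
-- ===== SOURCE B (Python) =====
-- def has_divider(d):
--     # The step (a,b,c) -> (b,c,(a+b+c)%d) is a bijection on residue triples,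
--     # so the orbit of the all-ones start triple is a pure cycle: the first state ever
--     # revisited is the start itself.  B therefore keeps no visited-set and no
--     # tuple/hash machinery at all: just three scalar registers a,b,c shifted
--     # each step, returning False when every register reads 1 again.
--     a, b, c = 1, 1, 1
--     while True:
--         a, b, c = b, c, (a + b + c) % d
--         if c == 0:
--             return True
--         if a == 1 and b == 1 and c == 1:
--             return False
-- ===== Notes on version B (the rewrite author's own statement) =====
-- stated objective: alternative
-- what changed: B discards A's growing hash-set of encoded states and A's tuple state: because the step map permutes residue triples, the orbit of the all-ones start triple is a pure cycle, so B just shifts three scalar registers and stops when they all read 1 again, keeping constant state instead of A's O(period) set.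
-- outside the precondition, e.g. on has_divider(0): A raises ZeroDivisionError, B raises ZeroDivisionError; on has_divider(-2): A returns False, B does not finish within the time limit
import Mathlib
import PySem

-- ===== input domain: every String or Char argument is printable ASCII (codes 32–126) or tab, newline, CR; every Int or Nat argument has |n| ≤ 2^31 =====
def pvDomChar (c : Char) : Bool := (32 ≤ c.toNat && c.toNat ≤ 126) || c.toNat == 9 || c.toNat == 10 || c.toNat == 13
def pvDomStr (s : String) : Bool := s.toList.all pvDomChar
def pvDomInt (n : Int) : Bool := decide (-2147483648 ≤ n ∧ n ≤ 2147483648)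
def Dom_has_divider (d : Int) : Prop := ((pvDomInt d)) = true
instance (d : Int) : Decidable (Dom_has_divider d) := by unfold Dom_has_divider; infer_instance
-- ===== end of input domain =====

-- B replaces A's growing visited-set and tuple state by three scalar registers and a
-- return-to-start test (the step map permutes residue triples, so the orbit is a pure cycle):
-- constant state instead of a growing hash set (objective: alternative).

-- ===== PORT A =====
-- while-True loop of A: the fuel argument is only a totality guard (proved sufficient below).
def hdLoopA (d : Int) : Nat → (Int × Int × Int) → PySem.Set Int → Bool
  | 0, _, _ => false
  | F + 1, T, s =>
    let T' : Int × Int × Int := (T.2.1, T.2.2, PySem.Int.mod (T.1 + T.2.1 + T.2.2) d)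
    if T'.2.2 = 0 then true
    else
      let v := T'.1 * d * d + T'.2.1 * d + T'.2.2
      if PySem.Set.contains s v then false
      else hdLoopA d F T' (PySem.Set.add s v)

def has_divider (d : Int) : Bool :=
  hdLoopA d ((d.natAbs + 2) ^ 3 + 2) (1, 1, 1) PySem.Set.empty

-- ===== PORT B =====
-- B's while loop over the three scalar registers a b c; same totality guard.
def hdGo (d : Int) : Nat → Int → Int → Int → Bool
  | 0, _, _, _ => false
  | F + 1, a, b, c =>
    let c' := PySem.Int.mod (a + b + c) d
    if c' = 0 then true
    else if b = 1 ∧ c = 1 ∧ c' = 1 then false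
    else hdGo d F b c c'

def has_divider_alt (d : Int) : Bool :=
  hdGo d ((d.natAbs + 2) ^ 3 + 2) 1 1 1

-- ===== PRECONDITION & SPEC =====
-- Pre_ excludes d ≤ 0: both programs raise ZeroDivisionError at d = 0, and for d < 0 Python's %
-- yields non-positive residues, so the all-ones start triple is never revisited and B's cycle test
-- diverges whenever no zero residue is hit (e.g. d = -2), while A still returns via its visited set.
def Pre_has_divider (d : Int) : Prop := 1 ≤ d
instance (d : Int) : Decidable (Pre_has_divider d) := by unfold Pre_has_divider; infer_instance

def pvWitness_has_divider : Int := 7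

def Spec_has_divider (d : Int) (out : Bool) : Prop := out = has_divider_alt d
instance (d : Int) (out : Bool) : Decidable (Spec_has_divider d out) := by unfold Spec_has_divider; infer_instance

-- ===== CLAIM (what is proved, stated in full; the proofs are below) =====
def Claim_equal_has_divider : Prop := ∀ (d : Int), Dom_has_divider d → Pre_has_divider d → Spec_has_divider d (has_divider d)

-- ===== LEMMAS AND PROOFS =====

-- the common step map and its orbit from the all-ones start triple
def pvStep (d : Int) (T : Int × Int × Int) : Int × Int × Int :=
  (T.2.1, T.2.2, PySem.Int.mod (T.1 + T.2.1 + T.2.2) d)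

def pvSeq (d : Int) (n : Nat) : Int × Int × Int := (pvStep d)^[n] (1, 1, 1)

def pvBox (d : Int) (T : Int × Int × Int) : Prop :=
  0 ≤ T.1 ∧ T.1 < d ∧ 0 ≤ T.2.1 ∧ T.2.1 < d ∧ 0 ≤ T.2.2 ∧ T.2.2 < d

def pvVal (d : Int) (T : Int × Int × Int) : Int := T.1 * d * d + T.2.1 * d + T.2.2

theorem pvSeq_succ (d : Int) (n : Nat) : pvSeq d (n + 1) = pvStep d (pvSeq d n) := by
  simp [pvSeq, Function.iterate_succ_apply']

theorem pvBox_step (d : Int) (hd : 0 < d) (T : Int × Int × Int) (h : pvBox d T) :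
    pvBox d (pvStep d T) := by
  obtain ⟨h1, h2, h3, h4, h5, h6⟩ := h
  exact ⟨h3, h4, h5, h6, PySem.Int.mod_nonneg _ hd, PySem.Int.mod_lt _ hd⟩

theorem pvBox_seq (d : Int) (hd : 2 ≤ d) (n : Nat) : pvBox d (pvSeq d n) := by
  induction n with
  | zero =>
    have h0 : pvSeq d 0 = (1, 1, 1) := rfl
    rw [h0]
    refine ⟨by norm_num, by omega, ?_, ?_, ?_, ?_⟩ <;> simp <;> omega
  | succ n ih => rw [pvSeq_succ]; exact pvBox_step d (by omega) _ ih

-- two-digit base-d cancellation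
theorem pvDigits (d a b a' b' : Int) (hd : 0 < d) (hb : 0 ≤ b) (hb' : b < d)
    (hc : 0 ≤ b') (hc' : b' < d) (h : a * d + b = a' * d + b') : a = a' ∧ b = b' := by
  have hb1 : (b + a * d) % d = b % d := Int.add_mul_emod_self_right b a d
  have hb2 : (b' + a' * d) % d = b' % d := Int.add_mul_emod_self_right b' a' d
  have hbb : b = b' := by
    have : b % d = b' % d := by
      rw [← Int.emod_eq_of_lt hb hb', ← Int.emod_eq_of_lt hc hc'] at *
      rw [← hb1, ← hb2]
      congr 1
      omega
    rwa [Int.emod_eq_of_lt hb hb', Int.emod_eq_of_lt hc hc'] at this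
  refine ⟨?_, hbb⟩
  have : a * d = a' * d := by omega
  exact mul_right_cancel₀ (by omega) this

theorem pvVal_inj (d : Int) (hd : 2 ≤ d) (T T' : Int × Int × Int)
    (hT : pvBox d T) (hT' : pvBox d T') (h : pvVal d T = pvVal d T') : T = T' := by
  obtain ⟨a, b, c⟩ := T
  obtain ⟨a', b', c'⟩ := T'
  obtain ⟨h1, h2, h3, h4, h5, h6⟩ := hT
  obtain ⟨g1, g2, g3, g4, g5, g6⟩ := hT'
  simp only [pvVal] at h
  have h' : (a * d + b) * d + c = (a' * d + b') * d + c' := by ring_nf; ring_nf at h; linarith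
  obtain ⟨hab, hc⟩ := pvDigits d (a * d + b) c (a' * d + b') c' (by omega) h5 h6 g5 g6 h'
  obtain ⟨ha, hb⟩ := pvDigits d a b a' b' (by omega) h3 h4 g3 g4 hab
  simp [ha, hb, hc]

theorem pvStep_inj (d : Int) (hd : 2 ≤ d) (T T' : Int × Int × Int)
    (hT : pvBox d T) (hT' : pvBox d T') (h : pvStep d T = pvStep d T') : T = T' := by
  obtain ⟨a, b, c⟩ := T
  obtain ⟨a', b', c'⟩ := T'
  obtain ⟨h1, h2, h3, h4, h5, h6⟩ := hT
  obtain ⟨g1, g2, g3, g4, g5, g6⟩ := hT'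
  simp only [pvStep, Prod.mk.injEq] at h
  obtain ⟨hb, hc, hm⟩ := h
  subst hb; subst hc
  rw [PySem.Int.mod_eq_emod_of_pos (show (0:Int) < d by omega)] at hm
  rw [PySem.Int.mod_eq_emod_of_pos (show (0:Int) < d by omega)] at hm
  have hdvd : d ∣ (a + b + c) - (a' + b + c) := by
    have := Int.emod_eq_emod_iff_emod_sub_eq_zero.mp hm
    exact Int.dvd_of_emod_eq_zero this
  have : a - a' = 0 := by
    apply Int.eq_zero_of_abs_lt_dvd (by simpa using hdvd)
    rw [abs_lt]; omega
  simp [show a = a' by omega]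

-- cancelling the step backwards along the orbit
theorem pvSeq_cancel (d : Int) (hd : 2 ≤ d) :
    ∀ i j, pvSeq d i = pvSeq d j → pvSeq d 0 = pvSeq d (j - i) := by
  intro i
  induction i with
  | zero => intro j h; simpa using h
  | succ i ih =>
    intro j h
    cases j with
    | zero =>
      simp
    | succ j =>
      have := pvStep_inj d hd _ _ (pvBox_seq d hd i) (pvBox_seq d hd j)
        (by rw [← pvSeq_succ, ← pvSeq_succ]; exact h)
      simpa using ih j this

-- pigeonhole: the orbit returns to the start within d³ steps
theorem pvReturn (d : Int) (hd : 2 ≤ d) :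
    ∃ n, 1 ≤ n ∧ n ≤ d.toNat ^ 3 ∧ pvSeq d n = (1, 1, 1) := by
  classical
  set B : Finset (Int × Int × Int) :=
    (Finset.Icc 0 (d - 1)) ×ˢ ((Finset.Icc 0 (d - 1)) ×ˢ (Finset.Icc 0 (d - 1))) with hB
  have hcard : B.card = d.toNat ^ 3 := by
    simp [hB, Int.card_Icc]
    ring
  have hmaps : ∀ n ∈ Finset.range (d.toNat ^ 3 + 1), pvSeq d n ∈ B := by
    intro n _
    obtain ⟨h1, h2, h3, h4, h5, h6⟩ := pvBox_seq d hd n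
    simp [hB, Finset.mem_Icc]
    omega
  have hlt : B.card < (Finset.range (d.toNat ^ 3 + 1)).card := by
    rw [hcard, Finset.card_range]; omega
  obtain ⟨i, hi, j, hj, hne, heq⟩ :=
    Finset.exists_ne_map_eq_of_card_lt_of_maps_to hlt hmaps
  rcases Nat.lt_or_ge i j with hij | hij
  · refine ⟨j - i, by omega, by simp at hi hj; omega, ?_⟩
    have := pvSeq_cancel d hd i j heq
    simpa [pvSeq] using this.symm
  · have hji : j < i := by omega
    refine ⟨i - j, by omega, by simp at hi hj; omega, ?_⟩
    have := pvSeq_cancel d hd j i heq.symm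
    simpa [pvSeq] using this.symm

-- run lemma for B's loop (scalar registers = the components of the current orbit point)
theorem pvRunB (d : Int) (_hd : 2 ≤ d) (n₀ : Nat)
    (hhit : (pvSeq d n₀).2.2 = 0 ∨ pvSeq d n₀ = (1, 1, 1)) (_h1 : 1 ≤ n₀)
    (hmin : ∀ m, 1 ≤ m → m < n₀ → ¬((pvSeq d m).2.2 = 0 ∨ pvSeq d m = (1, 1, 1))) :
    ∀ F k, k < n₀ → n₀ ≤ k + F →
      hdGo d F (pvSeq d k).1 (pvSeq d k).2.1 (pvSeq d k).2.2
        = decide ((pvSeq d n₀).2.2 = 0) := by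
  intro F
  induction F with
  | zero => intro k hk hF; omega
  | succ F ih =>
    intro k hk hF
    have hc : PySem.Int.mod ((pvSeq d k).1 + (pvSeq d k).2.1 + (pvSeq d k).2.2) d
        = (pvSeq d (k + 1)).2.2 := by rw [pvSeq_succ]; rfl
    have ha1 : (pvSeq d k).2.1 = (pvSeq d (k + 1)).1 := by rw [pvSeq_succ]; rfl
    have hb1 : (pvSeq d k).2.2 = (pvSeq d (k + 1)).2.1 := by rw [pvSeq_succ]; rfl
    have htrip : ((pvSeq d k).2.1 = 1 ∧ (pvSeq d k).2.2 = 1 ∧ (pvSeq d (k + 1)).2.2 = 1)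
        ↔ pvSeq d (k + 1) = (1, 1, 1) := by
      rw [ha1, hb1, Prod.ext_iff, Prod.ext_iff]
    simp only [hdGo]
    rw [hc]
    by_cases hk1 : k + 1 = n₀
    · rcases hhit with hz | hs
      · rw [hk1, if_pos hz]
        simp [hz]
      · have hz : ¬((pvSeq d n₀).2.2 = 0) := by rw [hs]; norm_num
        rw [hk1] at htrip
        rw [hk1, if_neg hz, if_pos (htrip.mpr hs)]
        simp [hz]
    · have hlt : k + 1 < n₀ := by omega
      have hm := hmin (k + 1) (by omega) hlt
      push Not at hm
      obtain ⟨hz, hs⟩ := hm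
      rw [if_neg hz, if_neg (fun h => hs (htrip.mp h)), ha1, hb1]
      exact ih (k + 1) hlt (by omega)

-- run lemma for A's loop
theorem pvRunA (d : Int) (hd : 2 ≤ d) (n₀ : Nat)
    (hhit : (pvSeq d n₀).2.2 = 0 ∨ pvSeq d n₀ = (1, 1, 1)) (h1 : 1 ≤ n₀)
    (hmin : ∀ m, 1 ≤ m → m < n₀ → ¬((pvSeq d m).2.2 = 0 ∨ pvSeq d m = (1, 1, 1))) :
    ∀ F k (s : PySem.Set Int),
      k < (if (pvSeq d n₀).2.2 = 0 then n₀ else n₀ + 1) →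
      (if (pvSeq d n₀).2.2 = 0 then n₀ else n₀ + 1) ≤ k + F →
      k ≤ n₀ →
      (∀ v : Int, PySem.Set.contains s v = true ↔ ∃ m, 1 ≤ m ∧ m ≤ k ∧ v = pvVal d (pvSeq d m)) →
      hdLoopA d F (pvSeq d k) s = decide ((pvSeq d n₀).2.2 = 0) := by
  have hdist : ∀ i j, 1 ≤ i → i < j → j ≤ n₀ → pvSeq d i ≠ pvSeq d j := by
    intro i j hi hij hj h
    have h0 := pvSeq_cancel d hd i j h
    have hstart : pvSeq d (j - i) = (1, 1, 1) := by
      rw [← h0]; rfl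
    exact hmin (j - i) (by omega) (by omega) (Or.inr hstart)
  intro F
  induction F with
  | zero => intro k s hk hF hkn inv; omega
  | succ F ih =>
    intro k s hk hF hkn inv
    have hstep : (((pvSeq d k).2.1, (pvSeq d k).2.2,
        PySem.Int.mod ((pvSeq d k).1 + (pvSeq d k).2.1 + (pvSeq d k).2.2) d) : Int × Int × Int)
        = pvSeq d (k + 1) := by rw [pvSeq_succ]; rfl
    have hc : PySem.Int.mod ((pvSeq d k).1 + (pvSeq d k).2.1 + (pvSeq d k).2.2) d
        = (pvSeq d (k + 1)).2.2 := by rw [pvSeq_succ]; rfl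
    have hvv : (pvSeq d k).2.1 * d * d + (pvSeq d k).2.2 * d + (pvSeq d (k + 1)).2.2
        = pvVal d (pvSeq d (k + 1)) := by
      simp only [pvVal, ← hstep]
    simp only [hdLoopA, hstep]
    rw [hc, hvv]
    rcases Nat.lt_trichotomy (k + 1) n₀ with hlt | heq | hgt
    · -- k+1 < n₀ : neither test fires, recurse
      have hm := hmin (k + 1) (by omega) hlt
      push Not at hm
      obtain ⟨hz, _⟩ := hm
      rw [if_neg hz]
      have hnm : ¬ PySem.Set.contains s (pvVal d (pvSeq d (k + 1))) = true := by
        intro h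
        obtain ⟨m, hm1, hmk, hveq⟩ := (inv _).mp h
        have := pvVal_inj d hd _ _ (pvBox_seq d hd m) (pvBox_seq d hd (k + 1)) hveq.symm
        exact hdist m (k + 1) hm1 (by omega) (by omega) this
      rw [if_neg hnm]
      refine ih (k + 1) _ ?_ ?_ (by omega) ?_
      · split <;> omega
      · split at hF <;> split <;> omega
      · intro v
        rw [PySem.Set.contains_iff, PySem.Set.mem_add]
        constructor
        · rintro (hv | hv)
          · obtain ⟨m, hm1, hmk, hveq⟩ := (inv v).mp (by rwa [PySem.Set.contains_iff])
            exact ⟨m, hm1, by omega, hveq⟩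
          · exact ⟨k + 1, by omega, by omega, hv⟩
        · rintro ⟨m, hm1, hmk, hveq⟩
          rcases Nat.lt_or_ge m (k + 1) with hmlt | hmge
          · exact Or.inl (by rw [← PySem.Set.contains_iff]; exact (inv v).mpr ⟨m, hm1, by omega, hveq⟩)
          · exact Or.inr (by rw [show m = k + 1 by omega] at hveq; exact hveq)
    · -- k+1 = n₀ : zero → True; start-return → A does not stop yet, recurse once more
      by_cases hz0 : (pvSeq d n₀).2.2 = 0
      · rw [heq, if_pos hz0]
        simp [hz0]
      · have hs : pvSeq d n₀ = (1, 1, 1) := hhit.resolve_left hz0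
        rw [heq, if_neg hz0]
        have hnm : ¬ PySem.Set.contains s (pvVal d (pvSeq d n₀)) = true := by
          intro h
          obtain ⟨m, hm1, hmk, hveq⟩ := (inv _).mp h
          have := pvVal_inj d hd _ _ (pvBox_seq d hd m) (pvBox_seq d hd n₀) hveq.symm
          exact hmin m hm1 (by omega) (Or.inr (this.trans hs))
        rw [if_neg hnm]
        refine ih n₀ _ ?_ ?_ (by omega) ?_
        · rw [if_neg hz0]; omega
        · rw [if_neg hz0]; rw [if_neg hz0] at hF; omega
        · intro v
          rw [PySem.Set.contains_iff, PySem.Set.mem_add]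
          constructor
          · rintro (hv | hv)
            · obtain ⟨m, hm1, hmk, hveq⟩ := (inv v).mp (by rwa [PySem.Set.contains_iff])
              exact ⟨m, hm1, by omega, hveq⟩
            · exact ⟨n₀, by omega, by omega, hv⟩
          · rintro ⟨m, hm1, hmk, hveq⟩
            rcases Nat.lt_or_ge m n₀ with hmlt | hmge
            · exact Or.inl (by rw [← PySem.Set.contains_iff]; exact (inv v).mpr ⟨m, hm1, by omega, hveq⟩)
            · exact Or.inr (by rw [show m = n₀ by omega] at hveq; exact hveq)
    · -- k = n₀ (only reachable when the hit was the start-return): the next value is already in s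
      have hkeq : k = n₀ := by omega
      have hz0 : ¬ (pvSeq d n₀).2.2 = 0 := by
        intro hz0
        rw [if_pos hz0] at hk
        omega
      have hs : pvSeq d n₀ = (1, 1, 1) := hhit.resolve_left hz0
      subst hkeq
      have hseq1 : pvSeq d (k + 1) = pvSeq d 1 := by
        rw [pvSeq_succ, hs]; rfl
      have hz1 : ¬ (pvSeq d (k + 1)).2.2 = 0 := by
        rw [hseq1]
        rcases Nat.lt_or_ge 1 k with h1k | h1k
        · exact fun h => hmin 1 (by omega) h1k (Or.inl h)
        · have : k = 1 := by omega
          rw [← this, hs]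
          norm_num
      rw [if_neg hz1]
      have hmem : PySem.Set.contains s (pvVal d (pvSeq d (k + 1))) = true := by
        rw [hseq1]
        exact (inv _).mpr ⟨1, by omega, by omega, rfl⟩
      rw [if_pos hmem]
      simp [hz0]

-- ===== VERDICT (by name: the statement is the Claim_ definition above) =====
theorem has_divider_spec : Claim_equal_has_divider := by
  intro d _ hPre
  unfold Spec_has_divider
  by_cases hd1 : d = 1
  · subst hd1; decide
  · have hd : 2 ≤ d := by unfold Pre_has_divider at hPre; omega
    obtain ⟨nw, hnw1, hnwB, hnwS⟩ := pvReturn d hd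
    classical
    have hex : ∃ n, 1 ≤ n ∧ ((pvSeq d n).2.2 = 0 ∨ pvSeq d n = (1, 1, 1)) :=
      ⟨nw, hnw1, Or.inr hnwS⟩
    obtain ⟨h1, hhit⟩ := Nat.find_spec hex
    have hmin : ∀ m, 1 ≤ m → m < Nat.find hex →
        ¬((pvSeq d m).2.2 = 0 ∨ pvSeq d m = (1, 1, 1)) := by
      intro m hm1 hmlt h
      exact Nat.find_min hex hmlt ⟨hm1, h⟩
    have hbound : Nat.find hex ≤ d.toNat ^ 3 :=
      le_trans (Nat.find_le ⟨hnw1, Or.inr hnwS⟩) hnwB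
    have hpow : d.toNat ^ 3 ≤ (d.natAbs + 2) ^ 3 := Nat.pow_le_pow_left (by omega) 3
    have h0 : ((1, 1, 1) : Int × Int × Int) = pvSeq d 0 := rfl
    have hA : has_divider d = decide ((pvSeq d (Nat.find hex)).2.2 = 0) := by
      unfold has_divider
      conv_lhs => rw [h0]
      refine pvRunA d hd (Nat.find hex) hhit h1 hmin _ 0 _ ?_ ?_ (by omega) ?_
      · split <;> omega
      · split <;> omega
      · intro v
        constructor
        · intro h
          rw [PySem.Set.contains_iff] at h
          simp [PySem.Set.empty] at h
        · rintro ⟨m, hm1, hmk, -⟩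
          omega
    have hB : has_divider_alt d = decide ((pvSeq d (Nat.find hex)).2.2 = 0) := by
      unfold has_divider_alt
      exact pvRunB d hd (Nat.find hex) hhit h1 hmin _ 0 (by omega) (by omega)
    rw [hA, hB]
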